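-- pv_equiv track=rewrite | github.com/m-luck/chungus-nightmare-api | shared/search.py | strip_extra
-- ===== SOURCE A (Python) =====
-- def strip_extra(text, mentions=True, links=True, hash=True, rt=True):
--     if mentions:
--         word_list = text.split(' ')
--         text = ' '.join([word for word in word_list if not word.startswith('@')])
--     if links:
--         word_list = text.split(' ')
--         text = ' '.join([word for word in word_list if not word.startswith('http') and not word.startswith('\nhttp')])
--     if hash:
--         word_list = text.split(' ')
--         text = ' '.join([word for word in word_list if not word.startswith('#')])
--     if rt:
--         word_list = text.split(' ')
--         text = ' '.join([word for word in word_list if not word.startswith('RT')])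
--     word_list = text.split(' ')
--     text = ' '.join([word for word in word_list if not word.endswith('…') and not word.startswith('&')])
--     return text
-- ===== SOURCE B (Python) =====
-- def strip_extra(text, mentions=True, links=True, hash=True, rt=True):
--     # single pass: keep the words that fail every active removal predicate
--     def remove(w):
--         return ((mentions and w.startswith('@'))
--                 or (links and (w.startswith('http') or w.startswith('\nhttp')))
--                 or (hash and w.startswith('#'))
--                 or (rt and w.startswith('RT'))
--                 or w.endswith('…')
--                 or w.startswith('&'))
--     return ' '.join(w for w in text.split(' ') if not remove(w))
-- ===== Notes on version B (the rewrite author's own statement) =====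
-- stated objective: simpler
-- what changed: Replaces A's five sequential split/filter/join passes with a single split and one comprehension using a combined removal predicate (the trailing-'…'/leading-'&' filter stays unconditional).
import Mathlib
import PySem

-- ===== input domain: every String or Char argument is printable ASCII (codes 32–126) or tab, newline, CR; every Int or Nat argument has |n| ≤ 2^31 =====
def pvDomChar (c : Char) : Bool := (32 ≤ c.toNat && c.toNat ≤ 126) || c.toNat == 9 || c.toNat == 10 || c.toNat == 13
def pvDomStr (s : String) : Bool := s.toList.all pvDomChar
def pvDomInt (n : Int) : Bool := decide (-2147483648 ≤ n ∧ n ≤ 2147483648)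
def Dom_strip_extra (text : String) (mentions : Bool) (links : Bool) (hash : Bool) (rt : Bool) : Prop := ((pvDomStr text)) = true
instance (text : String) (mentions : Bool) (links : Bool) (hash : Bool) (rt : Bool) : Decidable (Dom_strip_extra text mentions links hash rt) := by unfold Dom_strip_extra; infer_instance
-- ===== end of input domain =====

-- B folds A's five sequential split/filter/join passes into a single split and one
-- filter with a combined removal predicate; objective: simpler.

-- ===== PORT A =====
-- one occurrence of A's repeated pattern:
--   word_list = text.split(' '); text = ' '.join([w for w in word_list if keep w])
def passA (keep : List Char → Bool) (t : List Char) : List Char :=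
  PySem.Chars.join [' '] ((PySem.Chars.splitOn t [' ']).filter keep)

-- the five keep-predicates of A's comprehensions, in source order
def k1 (w : List Char) : Bool := !(PySem.Chars.startswith w ['@'])
def k2 (w : List Char) : Bool := !(PySem.Chars.startswith w ['h','t','t','p']) && !(PySem.Chars.startswith w ['\n','h','t','t','p'])
def k3 (w : List Char) : Bool := !(PySem.Chars.startswith w ['#'])
def k4 (w : List Char) : Bool := !(PySem.Chars.startswith w ['R','T'])
def k5 (w : List Char) : Bool := !(PySem.Chars.endswith w ['…']) && !(PySem.Chars.startswith w ['&'])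

def strip_extra (text : String) (mentions : Bool) (links : Bool) (hash : Bool) (rt : Bool) : String :=
  let t0 := text.toList
  let t1 := if mentions then passA k1 t0 else t0
  let t2 := if links then passA k2 t1 else t1
  let t3 := if hash then passA k3 t2 else t2
  let t4 := if rt then passA k4 t3 else t3
  String.ofList (passA k5 t4)

-- ===== PORT B =====
-- Source B's inner 'remove(w)'
def removeW (mentions links hash rt : Bool) (w : List Char) : Bool :=
  (mentions && PySem.Chars.startswith w ['@'])
  || (links && (PySem.Chars.startswith w ['h','t','t','p'] || PySem.Chars.startswith w ['\n','h','t','t','p']))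
  || (hash && PySem.Chars.startswith w ['#'])
  || (rt && PySem.Chars.startswith w ['R','T'])
  || PySem.Chars.endswith w ['…']
  || PySem.Chars.startswith w ['&']

def strip_extra_alt (text : String) (mentions : Bool) (links : Bool) (hash : Bool) (rt : Bool) : String :=
  String.ofList (PySem.Chars.join [' ']
    ((PySem.Chars.splitOn text.toList [' ']).filter (fun w => !(removeW mentions links hash rt w))))

-- ===== PRECONDITION & SPEC =====
def Spec_strip_extra (text : String) (mentions : Bool) (links : Bool) (hash : Bool) (rt : Bool) (out : String) : Prop := out = strip_extra_alt text mentions links hash rt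
instance (text : String) (mentions : Bool) (links : Bool) (hash : Bool) (rt : Bool) (out : String) : Decidable (Spec_strip_extra text mentions links hash rt out) := by unfold Spec_strip_extra; infer_instance

-- ===== CLAIM (what is proved, stated in full; the proofs are below) =====
def Claim_equal_strip_extra : Prop := ∀ (text : String) (mentions : Bool) (links : Bool) (hash : Bool) (rt : Bool), Dom_strip_extra text mentions links hash rt → Spec_strip_extra text mentions links hash rt (strip_extra text mentions links hash rt)

-- ===== LEMMAS AND PROOFS =====

-- structural model of Python's s.split(' ')
def spl : List Char → List Char → List (List Char)
  | [], cur => [cur.reverse]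
  | c :: rest, cur => if c = ' ' then cur.reverse :: spl rest [] else spl rest (c :: cur)

theorem go_space : ∀ (fuel : Nat) (s cur : List Char) (acc : List (List Char)),
    List.length s < fuel →
    PySem.Chars.splitOn.go [' '] fuel s cur acc = acc.reverse ++ spl s cur := by
  intro fuel
  induction fuel with
  | zero => intro s cur acc h; omega
  | succ n ih =>
    intro s cur acc h
    cases s with
    | nil => simp [PySem.Chars.splitOn.go, spl]
    | cons c rest =>
      by_cases hc : c = ' '
      · subst hc
        have hgo : PySem.Chars.splitOn.go [' '] (n+1) (' ' :: rest) cur acc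
            = PySem.Chars.splitOn.go [' '] n rest [] (cur.reverse :: acc) := by
          simp [PySem.Chars.splitOn.go, List.isPrefixOf]
        rw [hgo, ih rest [] (cur.reverse :: acc) (by simpa using Nat.lt_of_succ_lt_succ h)]
        simp [spl]
      · have hgo : PySem.Chars.splitOn.go [' '] (n+1) (c :: rest) cur acc
            = PySem.Chars.splitOn.go [' '] n rest (c :: cur) acc := by
          simp [PySem.Chars.splitOn.go, List.isPrefixOf]
          intro h'
          exact absurd h'.symm hc
        rw [hgo, ih rest (c :: cur) acc (by simpa using Nat.lt_of_succ_lt_succ h)]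
        simp [spl, hc]

theorem splitOn_space (s : List Char) : PySem.Chars.splitOn s [' '] = spl s [] := by
  have := go_space (s.length + 1) s [] [] (by omega)
  simpa [PySem.Chars.splitOn] using this

theorem spl_no_space : ∀ (s cur : List Char), ' ' ∉ cur → ∀ w ∈ spl s cur, ' ' ∉ w := by
  intro s
  induction s with
  | nil => intro cur hcur w hw; simp [spl] at hw; subst hw; simpa using hcur
  | cons c rest ih =>
    intro cur hcur w hw
    by_cases hc : c = ' '
    · subst hc
      simp [spl] at hw
      rcases hw with hw | hw
      · subst hw; simpa using hcur
      · exact ih [] (by simp) w hw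
    · simp [spl, hc] at hw
      exact ih (c :: cur) (by simp [hcur, Ne.symm hc]) w hw

theorem spl_word : ∀ (w cur : List Char), ' ' ∉ w → spl w cur = [cur.reverse ++ w] := by
  intro w
  induction w with
  | nil => intro cur _; simp [spl]
  | cons c rest ih =>
    intro cur hw
    have hc : ¬ (c = ' ') := by intro h; exact hw (by simp [h])
    rw [show spl (c :: rest) cur = spl rest (c :: cur) by simp [spl, hc]]
    rw [ih (c :: cur) (fun h => hw (by simp [h]))]
    simp

theorem spl_word_space : ∀ (w t cur : List Char), ' ' ∉ w →
    spl (w ++ ' ' :: t) cur = (cur.reverse ++ w) :: spl t [] := by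
  intro w
  induction w with
  | nil => intro t cur _; simp [spl]
  | cons c rest ih =>
    intro t cur hw
    have hc : ¬ (c = ' ') := by intro h; exact hw (by simp [h])
    rw [List.cons_append, show spl (c :: (rest ++ ' ' :: t)) cur = spl (rest ++ ' ' :: t) (c :: cur) by simp [spl, hc]]
    rw [ih t (c :: cur) (fun h => hw (by simp [h]))]
    simp

theorem spl_intercalate : ∀ (ws : List (List Char)), ws ≠ [] → (∀ w ∈ ws, ' ' ∉ w) →
    spl (List.intercalate [' '] ws) [] = ws := by
  intro ws
  induction ws with
  | nil => intro h; exact absurd rfl h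
  | cons w ws' ih =>
    intro _ hsp
    cases ws' with
    | nil =>
      rw [show List.intercalate [' '] [w] = w by simp [List.intercalate]]
      exact (spl_word w [] (hsp w (by simp))).trans (by simp)
    | cons b l =>
      rw [show List.intercalate [' '] (w :: b :: l) = w ++ ' ' :: List.intercalate [' '] (b :: l) by
        simp [List.intercalate]]
      rw [spl_word_space _ _ _ (hsp w (by simp))]
      rw [ih (by simp) (fun v hv => hsp v (by simp [hv]))]
      simp

def normL (L : List (List Char)) : List (List Char) := if L = [] then [[]] else L

theorem spl_passA (p : List Char → Bool) (hp : p [] = true) (t : List Char)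
    (L : List (List Char)) (hL : spl t [] = normL L) (hsp : ∀ w ∈ L, ' ' ∉ w) :
    spl (passA p t) [] = normL (L.filter p) ∧ (∀ w ∈ L.filter p, ' ' ∉ w) := by
  refine ⟨?_, fun w hw => hsp w (List.mem_of_mem_filter hw)⟩
  unfold passA
  rw [splitOn_space, hL]
  by_cases hL0 : L = []
  · subst hL0
    simp [normL, hp, PySem.Chars.join, List.intercalate, spl]
  · rw [show normL L = L by simp [normL, hL0]]
    by_cases hF : L.filter p = []
    · simp [hF, normL, PySem.Chars.join, List.intercalate, spl]
    · rw [show normL (L.filter p) = L.filter p by simp [normL, hF]]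
      have : PySem.Chars.join [' '] (L.filter p) = List.intercalate [' '] (L.filter p) := rfl
      rw [this]
      exact spl_intercalate _ hF (fun w hw => hsp w (List.mem_of_mem_filter hw))

theorem passA_final (p : List Char → Bool) (hp : p [] = true) (t : List Char)
    (L : List (List Char)) (hL : spl t [] = normL L) :
    passA p t = PySem.Chars.join [' '] (L.filter p) := by
  unfold passA
  rw [splitOn_space, hL]
  by_cases hL0 : L = []
  · subst hL0
    simp [normL, hp, PySem.Chars.join, List.intercalate]
  · rw [show normL L = L by simp [normL, hL0]]

theorem step_opt (b : Bool) (p : List Char → Bool) (hp : p [] = true) (t : List Char)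
    (L : List (List Char)) (hL : spl t [] = normL L) (hsp : ∀ w ∈ L, ' ' ∉ w) :
    spl (if b then passA p t else t) [] = normL (if b then L.filter p else L)
      ∧ (∀ w ∈ (if b then L.filter p else L), ' ' ∉ w) := by
  cases b
  · simpa using ⟨hL, hsp⟩
  · simpa using spl_passA p hp t L hL hsp

theorem chain_filter (m l h r : Bool) (W : List (List Char)) :
    (if r then (if h then (if l then (if m then W.filter k1 else W).filter k2
        else (if m then W.filter k1 else W)).filter k3
        else (if l then (if m then W.filter k1 else W).filter k2
        else (if m then W.filter k1 else W))).filter k4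
        else (if h then (if l then (if m then W.filter k1 else W).filter k2
        else (if m then W.filter k1 else W)).filter k3
        else (if l then (if m then W.filter k1 else W).filter k2
        else (if m then W.filter k1 else W)))).filter k5
      = W.filter (fun w => !(removeW m l h r w)) := by
  cases m <;> cases l <;> cases h <;> cases r <;>
    · simp only [Bool.false_eq_true, if_true, if_false, List.filter_filter]
      refine List.filter_congr (fun w _ => ?_)
      simp only [k1, k2, k3, k4, k5, removeW]
      cases PySem.Chars.startswith w ['@'] <;>
        cases PySem.Chars.startswith w ['h','t','t','p'] <;>
        cases PySem.Chars.startswith w ['\n','h','t','t','p'] <;>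
        cases PySem.Chars.startswith w ['#'] <;>
        cases PySem.Chars.startswith w ['R','T'] <;>
        cases PySem.Chars.endswith w ['…'] <;>
        cases PySem.Chars.startswith w ['&'] <;> rfl

-- ===== VERDICT (by name: the statement is the Claim_ definition above) =====
theorem spl_ne_nil : ∀ (s cur : List Char), spl s cur ≠ [] := by
  intro s
  induction s with
  | nil => intro cur; simp [spl]
  | cons c rest ih =>
    intro cur
    by_cases hc : c = ' ' <;> simp [spl, hc]
    exact ih (c :: cur)

theorem strip_extra_spec : Claim_equal_strip_extra := by
  intro text m l h r _
  unfold Spec_strip_extra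
  simp only [strip_extra, strip_extra_alt]
  have hk1 : k1 [] = true := by decide
  have hk2 : k2 [] = true := by decide
  have hk3 : k3 [] = true := by decide
  have hk4 : k4 [] = true := by decide
  have hk5 : k5 [] = true := by decide
  have hspW : ∀ w ∈ spl text.toList [], ' ' ∉ w := spl_no_space text.toList [] (by simp)
  have hW0 : spl text.toList [] = normL (spl text.toList []) := by
    rw [normL, if_neg (spl_ne_nil _ _)]
  obtain ⟨h1, s1⟩ := step_opt m k1 hk1 text.toList (spl text.toList []) hW0 hspW
  obtain ⟨h2, s2⟩ := step_opt l k2 hk2 _ _ h1 s1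
  obtain ⟨h3, s3⟩ := step_opt h k3 hk3 _ _ h2 s2
  obtain ⟨h4, s4⟩ := step_opt r k4 hk4 _ _ h3 s3
  rw [passA_final k5 hk5 _ _ h4, splitOn_space]
  congr 1
  congr 1
  exact chain_filter m l h r (spl text.toList [])
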